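-- pv_equiv track=rewrite | github.com/alokg-812/Python_Codes | Python_Course/oppe2practice/good_year_papers.py | good_years
-- ===== SOURCE A (Python) =====
-- def good_years(papers):
--     max = 0
--     for i in papers:
--         if i[1]>max:
--             max = i[1]
--     years = []
--     for i in papers:
--         if i[1] == max:
--             years.append(i[0])
--     return years
-- ===== SOURCE B (Python) =====
-- def good_years(papers):
--     best = 0
--     years = []
--     for year, count in papers:
--         if count > best:
--             best = count
--             years = [year]
--         elif count == best:
--             years.append(year)
--     return years
-- ===== Notes on version B (the rewrite author's own statement) =====
-- stated objective: alternative
-- what changed: B fuses A's two passes into a single loop that maintains the running maximum together with the candidate year list, resetting the list whenever a strictly larger second value appears.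
import Mathlib
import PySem

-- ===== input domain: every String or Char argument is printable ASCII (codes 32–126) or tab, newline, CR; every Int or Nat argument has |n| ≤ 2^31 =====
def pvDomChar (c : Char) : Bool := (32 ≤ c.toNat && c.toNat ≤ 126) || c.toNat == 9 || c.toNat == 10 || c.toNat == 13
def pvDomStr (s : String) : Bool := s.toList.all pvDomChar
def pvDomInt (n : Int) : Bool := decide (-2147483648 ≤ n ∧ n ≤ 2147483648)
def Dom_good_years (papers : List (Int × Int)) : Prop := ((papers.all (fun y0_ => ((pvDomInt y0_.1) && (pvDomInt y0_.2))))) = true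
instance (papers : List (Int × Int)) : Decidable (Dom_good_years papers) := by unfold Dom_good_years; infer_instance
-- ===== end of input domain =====

-- B fuses A's two passes into a single loop carrying (running max, candidate years); same values, one traversal.

-- ===== PORT A =====
-- first loop: running maximum starting at 0
def good_years (papers : List (Int × Int)) : List Int :=
  let m := papers.foldl (fun m i => if i.2 > m then i.2 else m) 0
  papers.foldl (fun years i => if i.2 = m then years ++ [i.1] else years) []

-- ===== PORT B =====
def good_years_alt (papers : List (Int × Int)) : List Int :=
  (papers.foldl
    (fun s i =>
      if i.2 > s.1 then (i.2, [i.1])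
      else if i.2 = s.1 then (s.1, s.2 ++ [i.1])
      else s)
    ((0 : Int), ([] : List Int))).2

-- ===== PRECONDITION & SPEC =====
def Spec_good_years (papers : List (Int × Int)) (out : List Int) : Prop := out = good_years_alt papers
instance (papers : List (Int × Int)) (out : List Int) : Decidable (Spec_good_years papers out) := by unfold Spec_good_years; infer_instance

-- ===== CLAIM (what is proved, stated in full; the proofs are below) =====
def Claim_equal_good_years : Prop := ∀ (papers : List (Int × Int)), Dom_good_years papers → Spec_good_years papers (good_years papers)

-- ===== LEMMAS AND PROOFS =====

def pvMaxF (l : List (Int × Int)) (m : Int) : Int :=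
  l.foldl (fun m i => if i.2 > m then i.2 else m) m

lemma pvMaxF_le (l : List (Int × Int)) (m : Int) : m ≤ pvMaxF l m := by
  induction l generalizing m with
  | nil => simp [pvMaxF]
  | cons i t ih =>
    simp only [pvMaxF, List.foldl_cons]
    by_cases h : i.2 > m
    · simp only [if_pos h]; exact le_trans (le_of_lt h) (ih i.2)
    · simp only [if_neg h]; exact ih m

-- B's loop, started at (m, ys), ends with the years whose count equals the overall max,
-- preceded by ys exactly when no strictly larger count occurred.
lemma pvFuse (l : List (Int × Int)) (m : Int) (ys : List Int) :
    l.foldl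
      (fun s i =>
        if i.2 > s.1 then (i.2, [i.1])
        else if i.2 = s.1 then (s.1, s.2 ++ [i.1])
        else s)
      (m, ys)
    = (pvMaxF l m,
       (if pvMaxF l m = m then ys else []) ++
         (l.filter (fun i => i.2 = pvMaxF l m)).map (·.1)) := by
  induction l generalizing m ys with
  | nil => simp [pvMaxF]
  | cons i t ih =>
    have hM : pvMaxF (i :: t) m = pvMaxF t (if i.2 > m then i.2 else m) := by
      simp [pvMaxF]
    simp only [List.foldl_cons]
    by_cases h1 : i.2 > m
    · simp only [if_pos h1, ih]
      have hM' : pvMaxF (i :: t) m = pvMaxF t i.2 := by rw [hM, if_pos h1]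
      have hne : pvMaxF (i :: t) m ≠ m := by
        rw [hM']
        intro he
        exact absurd (he ▸ pvMaxF_le t i.2) (not_le.mpr h1)
      rw [hM']
      by_cases h2 : i.2 = pvMaxF t i.2
      · simp [ih, h2.symm]
        intro he; omega
      · have h2' : ¬ (pvMaxF t i.2 = i.2) := fun he => h2 he.symm
        have hle := pvMaxF_le t i.2
        simp [ih, h2, if_neg h2']
        intro he; omega
    · simp only [if_neg h1]
      have hM' : pvMaxF (i :: t) m = pvMaxF t m := by rw [hM, if_neg h1]
      by_cases h2 : i.2 = m
      · simp only [if_pos h2, ih, hM']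
        by_cases h3 : pvMaxF t m = m
        · simp [List.filter_cons, h2, h3, List.append_assoc]
        · have : ¬ (i.2 = pvMaxF t m) := fun he => h3 (by omega)
          simp [List.filter_cons, this, h3]
      · simp only [if_neg h2, ih, hM']
        have : ¬ (i.2 = pvMaxF t m) := by
          intro he
          have := pvMaxF_le t m
          omega
        simp [List.filter_cons, this]

lemma pvA_filter (l : List (Int × Int)) (M : Int) (ys : List Int) :
    l.foldl (fun years i => if i.2 = M then years ++ [i.1] else years) ys
    = ys ++ (l.filter (fun i => i.2 = M)).map (·.1) := by
  induction l generalizing ys with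
  | nil => simp
  | cons i t ih =>
    by_cases h : i.2 = M
    · simp [List.filter_cons, h, ih, List.append_assoc]
    · simp [List.filter_cons, h, ih]

-- ===== VERDICT (by name: the statement is the Claim_ definition above) =====
theorem good_years_spec : Claim_equal_good_years := by
  intro papers _
  unfold Spec_good_years good_years good_years_alt
  rw [pvFuse papers 0 []]
  simp only []
  rw [pvA_filter]
  show ([] : List Int) ++ _ = (if pvMaxF papers 0 = 0 then ([] : List Int) else []) ++ _
  simp [pvMaxF]
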